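-- pv_equiv track=rewrite | github.com/jansenk/advent2020 | advent/solutions/day17.py | get_surrounding_points
-- ===== SOURCE A (Python) =====
-- def get_surrounding_points(p):
-- 	pm1 = (0, 1, -1)
-- 	results = []
-- 	for x in pm1:
-- 		for y in pm1:
-- 			for z in pm1:
-- 				if len(p) == 4:
-- 					for w in pm1:
-- 						if all(n == 0 for n in (x, y, z, w)):
-- 							continue
-- 						else:
-- 							results.append((
-- 								p[0] + x,
-- 								p[1] + y,
-- 								p[2] + z,
-- 								p[3] + w
-- 							))
-- 				else:
-- 					if all(n == 0 for n in (x, y, z)):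
-- 						continue
-- 					else:
-- 						results.append((
-- 							p[0] + x,
-- 							p[1] + y,
-- 							p[2] + z
-- 						))
-- 	return results
-- ===== SOURCE B (Python) =====
-- def get_surrounding_points(p):
--     n = 4 if len(p) == 4 else 3
--     def offsets(k):
--         if k == 0:
--             return [()]
--         return [(d,) + rest for d in (0, 1, -1) for rest in offsets(k - 1)]
--     return [tuple(p[i] + d[i] for i in range(n)) for d in offsets(n) if any(d)]
-- ===== Notes on version B (the rewrite author's own statement) =====
-- stated objective: simpler
-- what changed: Replaces A's duplicated 3D/4D nested-loop branches with a single pass: a recursively built Cartesian product of offsets, filtered to drop the all-zero offset, mapped over index-wise addition.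
import Mathlib
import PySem

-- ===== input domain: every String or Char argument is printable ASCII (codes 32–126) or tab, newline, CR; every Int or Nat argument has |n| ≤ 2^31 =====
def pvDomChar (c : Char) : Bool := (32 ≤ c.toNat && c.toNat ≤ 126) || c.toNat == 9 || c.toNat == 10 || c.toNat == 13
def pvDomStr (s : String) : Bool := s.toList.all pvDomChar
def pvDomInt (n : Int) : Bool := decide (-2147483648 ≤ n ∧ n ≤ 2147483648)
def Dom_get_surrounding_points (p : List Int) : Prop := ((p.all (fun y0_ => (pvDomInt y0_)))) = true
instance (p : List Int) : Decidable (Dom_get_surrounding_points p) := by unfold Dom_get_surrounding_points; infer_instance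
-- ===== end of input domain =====

-- B unifies A's duplicated 3D/4D branches into one product-filter-map pass (objective: simpler).

-- ===== PORT A =====
def get_surrounding_points (p : List Int) : List (List Int) :=
  let pm1 : List Int := [0, 1, -1]
  pm1.foldl (fun results x =>
    pm1.foldl (fun results y =>
      pm1.foldl (fun results z =>
        if p.length = 4 then
          pm1.foldl (fun results w =>
            if x = 0 ∧ y = 0 ∧ z = 0 ∧ w = 0 then results
            else results ++ [[PySem.List.pyGetD p 0 0 + x, PySem.List.pyGetD p 1 0 + y,
                              PySem.List.pyGetD p 2 0 + z, PySem.List.pyGetD p 3 0 + w]]) results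
        else
          if x = 0 ∧ y = 0 ∧ z = 0 then results
          else results ++ [[PySem.List.pyGetD p 0 0 + x, PySem.List.pyGetD p 1 0 + y,
                            PySem.List.pyGetD p 2 0 + z]]) results) results) []

-- ===== PORT B =====
-- helper: offsets(k) from Source B — Cartesian product of (0,1,-1) of length k, first coordinate slowest
def pvOffsets : Nat → List (List Int)
  | 0 => [[]]
  | k + 1 => ([0, 1, -1] : List Int).flatMap (fun d => (pvOffsets k).map (fun rest => d :: rest))

def get_surrounding_points_alt (p : List Int) : List (List Int) :=
  let n : Nat := if p.length = 4 then 4 else 3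
  ((pvOffsets n).filter (fun d => d.any (fun v => v ≠ 0))).map
    (fun d => (List.range n).map (fun i => PySem.List.pyGetD p (i : Int) 0 + PySem.List.pyGetD d (i : Int) 0))

-- ===== PRECONDITION & SPEC =====
-- Python A raises IndexError when len(p) < 3 (p[0..2] out of range); exactly those inputs are excluded.
def Pre_get_surrounding_points (p : List Int) : Prop := 3 ≤ p.length
instance (p : List Int) : Decidable (Pre_get_surrounding_points p) := by unfold Pre_get_surrounding_points; infer_instance
def pvWitness_get_surrounding_points : List Int := ([1, 2, 3] : List Int)

def Spec_get_surrounding_points (p : List Int) (out : List (List Int)) : Prop := out = get_surrounding_points_alt p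
instance (p : List Int) (out : List (List Int)) : Decidable (Spec_get_surrounding_points p out) := by unfold Spec_get_surrounding_points; infer_instance

-- ===== CLAIM (what is proved, stated in full; the proofs are below) =====
def Claim_equal_get_surrounding_points : Prop := ∀ (p : List Int), Dom_get_surrounding_points p → Pre_get_surrounding_points p → Spec_get_surrounding_points p (get_surrounding_points p)

-- ===== LEMMAS AND PROOFS =====

-- ===== VERDICT (by name: the statement is the Claim_ definition above) =====
set_option maxRecDepth 40000 in
set_option maxHeartbeats 1000000 in
theorem get_surrounding_points_spec : Claim_equal_get_surrounding_points := by
  intro p _ hpre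
  unfold Pre_get_surrounding_points at hpre
  match p, hpre with
  | a :: b :: c :: rest, _ =>
    by_cases h4 : rest.length = 1
    · match rest, h4 with
      | [d], _ =>
        simp [Spec_get_surrounding_points, get_surrounding_points, get_surrounding_points_alt,
          pvOffsets, List.range_succ, PySem.List.pyGetD, PySem.List.pyGet?, PySem.List.pyIdx?]
    · simp [Spec_get_surrounding_points, get_surrounding_points, get_surrounding_points_alt, h4,
        pvOffsets, List.range_succ, PySem.List.pyGetD, PySem.List.pyGet?, PySem.List.pyIdx?]
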